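-- pv_equiv track=rewrite | github.com/SoheilSaya/Unlim-challenges | username bahal.py | is_cool
-- ===== SOURCE A (Python) =====
-- def is_cool(username):
--     """
--     Check if the username is cool or not.
--
--     Args:
--         username (str): The username to check.
--
--     Returns:
--         str: 'cool' if the username is cool, 'not cool' otherwise.
--     """
--     char_count = {}
--     for char in username:
--         char_count[char] = char_count.get(char, 0) + 1
--
--     for count in char_count.values():
--         if count < 2:
--             return 'not cool'
--     return 'cool'
-- ===== SOURCE B (Python) =====
-- def is_cool(username):
--     """Sort the characters, then scan runs of equal characters:
--     any run of length 1 means some character does not repeat."""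
--     s = sorted(username)
--     i, n = 0, len(s)
--     while i < n:
--         j = i + 1
--         while j < n and s[j] == s[i]:
--             j += 1
--         if j - i < 2:
--             return 'not cool'
--         i = j
--     return 'cool'
-- ===== Notes on version B (the rewrite author's own statement) =====
-- stated objective: alternative
-- what changed: Replaced the hash frequency-table build plus value scan with a sort-then-run-scan: sort the characters and fail as soon as a run of equal adjacent characters has length 1.
import Mathlib
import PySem

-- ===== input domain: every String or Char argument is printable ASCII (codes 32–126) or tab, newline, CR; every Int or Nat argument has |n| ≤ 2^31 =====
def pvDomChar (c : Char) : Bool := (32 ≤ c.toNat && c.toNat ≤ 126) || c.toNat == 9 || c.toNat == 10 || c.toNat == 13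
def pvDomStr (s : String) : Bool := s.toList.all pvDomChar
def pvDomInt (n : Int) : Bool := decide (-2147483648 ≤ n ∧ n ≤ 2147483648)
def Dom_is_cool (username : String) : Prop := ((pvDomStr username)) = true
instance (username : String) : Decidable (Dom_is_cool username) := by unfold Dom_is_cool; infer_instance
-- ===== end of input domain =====

-- B replaces A's frequency-dictionary build + value scan by sorting the characters
-- and scanning runs of equal adjacent characters (alternative decomposition, not faster).

-- ===== PORT A =====
-- the second loop of A: scan the dict's values, return 'not cool' on the first count < 2
def pvScanVals : List Int → String
  | [] => "cool"
  | v :: vs => if v < 2 then "not cool" else pvScanVals vs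

def is_cool (username : String) : String :=
  let char_count := username.toList.foldl
    (fun d ch => d.insert ch (d.getD ch 0 + 1)) PySem.Dict.empty
  pvScanVals char_count.values

-- ===== PORT B =====
-- outer while loop of Source B over the sorted list; the inner while that advances j past
-- the current run is takeWhile/dropWhile on (· == c)
def pvScanRuns : List Char → String
  | [] => "cool"
  | c :: rest =>
    if (rest.takeWhile (· == c)).length + 1 < 2 then "not cool"
    else pvScanRuns (rest.dropWhile (· == c))
termination_by l => l.length
decreasing_by
  simp only [List.length_cons]
  exact Nat.lt_succ_of_le (List.length_dropWhile_le ..)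

def is_cool_alt (username : String) : String :=
  pvScanRuns (PySem.List.sorted username.toList (fun x => x) false)

-- ===== PRECONDITION & SPEC =====
def Spec_is_cool (username : String) (out : String) : Prop := out = is_cool_alt username
instance (username : String) (out : String) : Decidable (Spec_is_cool username out) := by unfold Spec_is_cool; infer_instance

-- ===== CLAIM (what is proved, stated in full; the proofs are below) =====
def Claim_equal_is_cool : Prop := ∀ (username : String), Dom_is_cool username → Spec_is_cool username (is_cool username)

-- ===== LEMMAS AND PROOFS =====

-- the common characterisation: 'cool' iff every character occurs at least twice
def coolSpec (l : List Char) : String :=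
  if ∀ c ∈ l, 2 ≤ l.count c then "cool" else "not cool"

theorem coolSpec_perm {l l' : List Char} (h : l.Perm l') : coolSpec l = coolSpec l' := by
  unfold coolSpec
  refine if_congr ?_ rfl rfl
  constructor
  · intro H c hc
    rw [← h.count_eq]; exact H c (h.mem_iff.mpr hc)
  · intro H c hc
    rw [h.count_eq]; exact H c (h.mem_iff.mp hc)

-- dropWhile stops at the first element failing the predicate
theorem dropWhile_cons_prop {p : Char → Bool} :
    ∀ (l : List Char) {h : Char} {r : List Char}, l.dropWhile p = h :: r → p h = false := by
  intro l
  induction l with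
  | nil => intro h r he; simp [List.dropWhile] at he
  | cons a l ih =>
    intro h r he
    by_cases hp : p a
    · rw [List.dropWhile_cons_of_pos hp] at he; exact ih he
    · rw [List.dropWhile_cons_of_neg hp] at he
      cases he; simpa using hp

theorem scanVals_map (f : Char → Int) (ks : List Char) :
    pvScanVals (ks.map f) = if ∀ k ∈ ks, ¬ (f k < 2) then "cool" else "not cool" := by
  induction ks with
  | nil => simp [pvScanVals]
  | cons k ks ih =>
    by_cases h : f k < 2
    · simp only [List.map_cons, pvScanVals, if_pos h]
      rw [if_neg]
      intro H
      have := H k (by simp)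
      omega
    · simp only [List.map_cons, pvScanVals, if_neg h, ih]
      refine if_congr ?_ rfl rfl
      constructor
      · intro H x hx
        rcases List.mem_cons.mp hx with h1 | h2
        · subst h1; exact h
        · exact H x h2
      · intro H x hx
        exact H x (List.mem_cons_of_mem _ hx)

theorem is_cool_eq_coolSpec (s : String) : is_cool s = coolSpec s.toList := by
  show pvScanVals (s.toList.foldl
      (fun d ch => d.insert ch (d.getD ch 0 + 1)) PySem.Dict.empty).values
    = coolSpec s.toList
  rw [PySem.Dict.foldl_insert_getD_add_one_eq_counter]
  have hv : (PySem.Dict.counter s.toList).values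
      = (PySem.Set.ofList s.toList).map (fun k => (s.toList.count k : Int)) := by
    show ((PySem.Dict.counter s.toList).items).map (·.2) = _
    rw [PySem.Dict.items_counter, List.map_map]
    rfl
  rw [hv, scanVals_map]
  unfold coolSpec
  refine if_congr ?_ rfl rfl
  constructor
  · intro H c hc
    have := H c ((PySem.Set.mem_ofList _ c).mpr hc)
    omega
  · intro H c hc
    have := H c ((PySem.Set.mem_ofList _ c).mp hc)
    omega

theorem scanRuns_spec : ∀ n (l : List Char), l.length ≤ n → l.Pairwise (· ≤ ·) →
    pvScanRuns l = coolSpec l := by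
  intro n
  induction n with
  | zero =>
    intro l hl _
    have : l = [] := List.eq_nil_of_length_eq_zero (Nat.le_zero.mp hl)
    subst this
    simp [pvScanRuns, coolSpec]
  | succ n ih =>
    intro l hl hp
    match l with
    | [] => simp [pvScanRuns, coolSpec]
    | c :: rest =>
      obtain ⟨t, ht⟩ : ∃ t, t = rest.takeWhile (· == c) := ⟨_, rfl⟩
      obtain ⟨d, hd⟩ : ∃ d, d = rest.dropWhile (· == c) := ⟨_, rfl⟩
      have hrest : t ++ d = rest := by rw [ht, hd]; exact List.takeWhile_append_dropWhile
      have hpr : rest.Pairwise (· ≤ ·) := (List.pairwise_cons.mp hp).2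
      have hcle : ∀ x ∈ rest, c ≤ x := (List.pairwise_cons.mp hp).1
      have hpd : d.Pairwise (· ≤ ·) :=
        hd ▸ List.Pairwise.sublist (List.dropWhile_sublist _) hpr
      have htc : ∀ x ∈ t, x = c := by
        intro x hx
        rw [ht] at hx
        have := List.mem_takeWhile_imp hx
        simpa using this
      have hcd : c ∉ d := by
        intro hmem
        cases hdd : d with
        | nil => rw [hdd] at hmem; simp at hmem
        | cons h dt =>
          rw [hdd] at hmem hpd
          have hhd : rest.dropWhile (· == c) = h :: dt := by rw [← hd, hdd]
          have hne' : h ≠ c := by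
            have := dropWhile_cons_prop rest hhd
            simpa using this
          have hhrest : h ∈ rest := by
            refine List.Sublist.subset (List.dropWhile_sublist (fun x => x == c)) ?_
            rw [hhd]; simp
          have hch : c < h := lt_of_le_of_ne (hcle h hhrest) (Ne.symm hne')
          rcases List.mem_cons.mp hmem with h1 | h2
          · exact hne' h1.symm
          · have : h ≤ c := (List.pairwise_cons.mp hpd).1 c h2
            exact absurd (lt_of_lt_of_le hch this) (lt_irrefl c)
      have hcl : (c :: rest).count c = 1 + t.length := by
        have h1 : t.count c = t.length := by
          rw [List.count_eq_length]
          intro b hb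
          simp [htc b hb]
        have h2 : d.count c = 0 := List.count_eq_zero.mpr hcd
        rw [List.count_cons_self, ← hrest, List.count_append, h1, h2]
        omega
      have hcountd : ∀ x ∈ d, (c :: rest).count x = d.count x := by
        intro x hx
        have hxc : x ≠ c := fun h => hcd (h ▸ hx)
        have hxt : x ∉ t := fun h => hxc (htc x h)
        rw [← hrest, List.count_cons, List.count_append,
          List.count_eq_zero.mpr hxt]
        simp [Ne.symm hxc]
      rw [pvScanRuns, ← ht, ← hd]
      by_cases hte : t = []
      · rw [if_pos (by rw [hte]; simp)]
        unfold coolSpec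
        rw [if_neg]
        intro H
        have := H c (by simp)
        rw [hcl, hte] at this
        simp at this
      · rw [if_neg (by intro h; exact hte (by
          have : t.length = 0 := by omega
          exact List.eq_nil_of_length_eq_zero this))]
        have hdlen : d.length ≤ n := by
          have h1 : d.length ≤ rest.length := hd ▸ List.length_dropWhile_le ..
          have h2 : rest.length + 1 ≤ n + 1 := by simpa using hl
          omega
        rw [ih d hdlen hpd]
        unfold coolSpec
        refine if_congr ?_ rfl rfl
        constructor
        · intro H x hx
          rcases List.mem_cons.mp hx with h1 | h2
          · subst h1; rw [hcl]
            have : t.length ≠ 0 := fun h => hte (List.eq_nil_of_length_eq_zero h)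
            omega
          · rcases List.mem_append.mp (hrest ▸ h2) with h3 | h4
            · rw [htc x h3, hcl]
              have : t.length ≠ 0 := fun h => hte (List.eq_nil_of_length_eq_zero h)
              omega
            · rw [hcountd x h4]; exact H x h4
        · intro H x hx
          rw [← hcountd x hx]
          exact H x (by
            refine List.mem_cons.mpr (Or.inr ?_)
            rw [← hrest]; exact List.mem_append.mpr (Or.inr hx))

theorem is_cool_alt_eq_coolSpec (s : String) : is_cool_alt s = coolSpec s.toList := by
  unfold is_cool_alt
  have hperm : (PySem.List.sorted s.toList (fun x => x) false).Perm s.toList :=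
    PySem.List.sorted_perm ..
  have hpw : (PySem.List.sorted s.toList (fun x => x) false).Pairwise (· ≤ ·) := by
    have := PySem.List.sorted_pairwise (xs := s.toList) (key := fun x => x)
    simpa using this
  rw [scanRuns_spec (PySem.List.sorted s.toList (fun x => x) false).length _ le_rfl hpw]
  exact coolSpec_perm hperm

-- ===== VERDICT (by name: the statement is the Claim_ definition above) =====
theorem is_cool_spec : Claim_equal_is_cool := by
  intro username _
  unfold Spec_is_cool
  rw [is_cool_eq_coolSpec, is_cool_alt_eq_coolSpec]
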